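-- pv_equiv track=rewrite | github.com/Hanziwww/Lacuna | python/lacuna/array_api/_dispatch.py | _normalize_axes_nd
-- ===== SOURCE A (Python) =====
-- def _normalize_axes_nd(axis, ndim: int):
--     if axis is None:
--         return None
--     if isinstance(axis, (list, tuple)):
--         if len(axis) == 0:
--             return tuple()
--         axes = tuple(int(a) for a in axis)
--     else:
--         axes = (int(axis),)
--     norm = []
--     for a in axes:
--         if a < 0:
--             a = ndim + a
--         if not (0 <= a < ndim):
--             raise ValueError("axis out of range")
--         if a not in norm:
--             norm.append(a)
--     return tuple(sorted(norm))
-- ===== SOURCE B (Python) =====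
-- def _normalize_axes_nd(axis, ndim: int):
--     if axis is None:
--         return None
--     if isinstance(axis, (list, tuple)):
--         if len(axis) == 0:
--             return tuple()
--         axes = tuple(int(a) for a in axis)
--     else:
--         axes = (int(axis),)
--     norm = []
--     for a in axes:
--         if a < 0:
--             a += ndim
--         if not (0 <= a < ndim):
--             raise ValueError("axis out of range")
--         norm.append(a)
--     norm.sort()
--     out = [norm[0]]
--     for a in norm[1:]:
--         if a != out[-1]:
--             out.append(a)
--     return tuple(out)
-- ===== Notes on version B (the rewrite author's own statement) =====
-- stated objective: alternative
-- what changed: A dedups during the loop with an O(u) list-membership test per axis and sorts the dedup list at the end; B appends every normalized axis, sorts once, and removes duplicates in a single adjacent-equality scan over the sorted list.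
import Mathlib
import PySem

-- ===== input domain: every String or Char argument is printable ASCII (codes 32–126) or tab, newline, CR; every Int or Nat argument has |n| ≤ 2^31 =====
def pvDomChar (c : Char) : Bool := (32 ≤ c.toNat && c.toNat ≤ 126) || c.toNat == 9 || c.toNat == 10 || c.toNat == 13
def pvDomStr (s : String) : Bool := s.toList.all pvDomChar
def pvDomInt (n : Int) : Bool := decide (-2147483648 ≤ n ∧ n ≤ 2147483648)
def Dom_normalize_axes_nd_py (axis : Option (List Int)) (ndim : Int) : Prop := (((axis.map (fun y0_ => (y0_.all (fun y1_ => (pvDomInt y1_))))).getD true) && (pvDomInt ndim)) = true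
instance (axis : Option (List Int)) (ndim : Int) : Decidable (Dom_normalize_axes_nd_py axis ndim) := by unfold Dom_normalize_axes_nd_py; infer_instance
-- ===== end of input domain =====

-- B replaces A's per-element membership dedup + final sort by append-all, sort, then an
-- adjacent-duplicate scan (alternative algorithm; return value only, no mutation observable).

-- ===== PORT A =====
-- the for-loop of A: accumulator `norm` (dedup list); raises (→ none) on out-of-range axis
def pvALoop (ndim : Int) : List Int → List Int → Option (List Int)
  | [], norm => some (PySem.List.sorted norm (fun x => x) false)
  | a :: t, norm =>
    let a' := if a < 0 then ndim + a else a
    if 0 ≤ a' ∧ a' < ndim then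
      pvALoop ndim t (if a' ∈ norm then norm else norm ++ [a'])
    else none

def normalize_axes_nd_py (axis : Option (List Int)) (ndim : Int) : Option (List Int) :=
  match axis with
  | none => none                      -- `return None`
  | some l =>
    if l = [] then some []            -- `return tuple()`
    else pvALoop ndim l []

-- ===== PORT B =====
-- B's first loop: normalize + range-check, append all (duplicates kept)
def pvBLoop (ndim : Int) : List Int → List Int → Option (List Int)
  | [], norm => some norm
  | a :: t, norm =>
    let a' := if a < 0 then a + ndim else a
    if 0 ≤ a' ∧ a' < ndim then pvBLoop ndim t (norm ++ [a'])
    else none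

-- B's second loop over norm[1:]: append a when a differs from out[-1] (= last appended)
def pvScan : Int → List Int → List Int
  | _, [] => []
  | last, a :: t => if a ≠ last then a :: pvScan a t else pvScan last t

def normalize_axes_nd_py_alt (axis : Option (List Int)) (ndim : Int) : Option (List Int) :=
  match axis with
  | none => none
  | some l =>
    if l = [] then some []
    else
      match pvBLoop ndim l [] with
      | none => none
      | some norm =>
        match PySem.List.sorted norm (fun x => x) false with
        | [] => some []               -- unreachable: l ≠ [] so norm ≠ []
        | h :: t => some (h :: pvScan h t)

-- ===== PRECONDITION & SPEC =====
-- Pre_ excludes exactly the inputs on which A raises ValueError("axis out of range"):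
-- some axis whose normalized value falls outside [0, ndim).
def Pre_normalize_axes_nd_py (axis : Option (List Int)) (ndim : Int) : Prop :=
  ∀ a ∈ axis.getD [], -ndim ≤ a ∧ a < ndim
instance (axis : Option (List Int)) (ndim : Int) : Decidable (Pre_normalize_axes_nd_py axis ndim) := by unfold Pre_normalize_axes_nd_py; infer_instance
def pvWitness_normalize_axes_nd_py : Option (List Int) × Int := (some [2, 0, -1, 2], 3)

def Spec_normalize_axes_nd_py (axis : Option (List Int)) (ndim : Int) (out : Option (List Int)) : Prop := out = normalize_axes_nd_py_alt axis ndim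
instance (axis : Option (List Int)) (ndim : Int) (out : Option (List Int)) : Decidable (Spec_normalize_axes_nd_py axis ndim out) := by unfold Spec_normalize_axes_nd_py; infer_instance

-- ===== CLAIM (what is proved, stated in full; the proofs are below) =====
def Claim_equal_normalize_axes_nd_py : Prop := ∀ (axis : Option (List Int)) (ndim : Int), Dom_normalize_axes_nd_py axis ndim → Pre_normalize_axes_nd_py axis ndim → Spec_normalize_axes_nd_py axis ndim (normalize_axes_nd_py axis ndim)

-- ===== LEMMAS AND PROOFS =====

-- ghost accumulators
def pvNormf (ndim a : Int) : Int := if a < 0 then ndim + a else a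

def pvGA (ndim : Int) : List Int → List Int → List Int
  | [], norm => norm
  | a :: t, norm =>
    let a' := pvNormf ndim a
    pvGA ndim t (if a' ∈ norm then norm else norm ++ [a'])

theorem pvALoop_eq (ndim : Int) (l norm : List Int)
    (h : ∀ a ∈ l, -ndim ≤ a ∧ a < ndim) :
    pvALoop ndim l norm = some (PySem.List.sorted (pvGA ndim l norm) (fun x => x) false) := by
  induction l generalizing norm with
  | nil => rfl
  | cons a t ih =>
    have ha := h a (List.mem_cons_self ..)
    have ht : ∀ b ∈ t, -ndim ≤ b ∧ b < ndim := fun b hb => h b (List.mem_cons_of_mem _ hb)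
    simp only [pvALoop, pvGA, pvNormf]
    rw [if_pos (by split <;> omega)]
    exact ih _ ht

theorem pvBLoop_eq (ndim : Int) (l norm : List Int)
    (h : ∀ a ∈ l, -ndim ≤ a ∧ a < ndim) :
    pvBLoop ndim l norm = some (norm ++ l.map (pvNormf ndim)) := by
  induction l generalizing norm with
  | nil => simp [pvBLoop]
  | cons a t ih =>
    have ha := h a (List.mem_cons_self ..)
    have ht : ∀ b ∈ t, -ndim ≤ b ∧ b < ndim := fun b hb => h b (List.mem_cons_of_mem _ hb)
    simp only [pvBLoop]
    rw [if_pos (by split <;> omega)]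
    rw [ih _ ht]
    simp [pvNormf, Int.add_comm]

theorem pvGA_mem (ndim : Int) (l norm : List Int) (x : Int) :
    x ∈ pvGA ndim l norm ↔ x ∈ norm ∨ x ∈ l.map (pvNormf ndim) := by
  induction l generalizing norm with
  | nil => simp [pvGA]
  | cons a t ih =>
    simp only [pvGA, List.map_cons, List.mem_cons, ih]
    by_cases hm : pvNormf ndim a ∈ norm
    · rw [if_pos hm]
      constructor
      · rintro (h | h)
        · exact Or.inl h
        · exact Or.inr (Or.inr h)
      · rintro (h | h | h)
        · exact Or.inl h
        · exact Or.inl (h ▸ hm)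
        · exact Or.inr h
    · rw [if_neg hm]
      simp only [List.mem_append, List.mem_singleton]
      tauto

theorem pvGA_nodup (ndim : Int) (l norm : List Int) (h : norm.Nodup) :
    (pvGA ndim l norm).Nodup := by
  induction l generalizing norm with
  | nil => exact h
  | cons a t ih =>
    simp only [pvGA]
    by_cases hm : pvNormf ndim a ∈ norm
    · rw [if_pos hm]; exact ih _ h
    · rw [if_neg hm]
      refine ih _ ?_
      have hne : ∀ x ∈ norm, ¬ x = pvNormf ndim a := fun x hx e => hm (e ▸ hx)
      simp only [List.nodup_append, List.nodup_cons, List.not_mem_nil, not_false_eq_true, List.nodup_nil, and_true, true_and, h]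
      intro x hx b hb
      simp only [List.mem_singleton] at hb
      exact hb ▸ hne x hx

theorem pvScan_mem (last : Int) (l : List Int) (x : Int) :
    x ∈ last :: pvScan last l ↔ x ∈ last :: l := by
  induction l generalizing last with
  | nil => rfl
  | cons a t ih =>
    simp only [pvScan]
    by_cases ha : a = last
    · rw [if_neg (by simp [ha])]
      subst ha
      rw [ih]
      simp only [List.mem_cons]
      tauto
    · rw [if_pos ha]
      have h1 := ih a
      simp only [List.mem_cons] at h1 ⊢
      tauto

theorem pvScan_pairwise (last : Int) (l : List Int)
    (h : (last :: l).Pairwise (· ≤ ·)) :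
    (last :: pvScan last l).Pairwise (· < ·) := by
  induction l generalizing last with
  | nil => simp [pvScan]
  | cons a t ih =>
    rcases List.pairwise_cons.1 h with ⟨hle, hat⟩
    have hla : last ≤ a := hle a (List.mem_cons_self ..)
    simp only [pvScan]
    by_cases ha : a = last
    · rw [if_neg (by simp [ha])]
      subst ha
      refine ih a ?_
      exact hat
    · rw [if_pos ha]
      have hlt : last < a := lt_of_le_of_ne hla (fun e => ha e.symm)
      have hpa : (a :: pvScan a t).Pairwise (· < ·) := ih a hat
      refine List.pairwise_cons.2 ⟨?_, hpa⟩
      intro x hx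
      rcases (pvScan_mem a t x).1 hx with h1
      rcases List.mem_cons.1 h1 with h2 | h2
      · omega
      · have := (List.pairwise_cons.1 hat).1 x h2
        omega

-- two strictly increasing lists with the same members are equal
theorem pvSortedUnique (l₁ l₂ : List Int)
    (h₁ : l₁.Pairwise (· < ·)) (h₂ : l₂.Pairwise (· < ·))
    (hm : ∀ x, x ∈ l₁ ↔ x ∈ l₂) : l₁ = l₂ := by
  haveI : Std.Antisymm (α := Int) (· < ·) := ⟨fun a b h1 h2 => absurd h1 (not_lt.2 h2.le)⟩
  have n₁ : l₁.Nodup := h₁.imp (fun h => ne_of_lt h)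
  have n₂ : l₂.Nodup := h₂.imp (fun h => ne_of_lt h)
  have hperm : l₁.Perm l₂ := by
    apply List.perm_of_nodup_nodup_toFinset_eq n₁ n₂
    ext x
    simp [List.mem_toFinset, hm x]
  exact hperm.eq_of_pairwise' h₁ h₂

theorem pvSorted_nodup_pairwise_lt (l : List Int) (h : l.Nodup) :
    (PySem.List.sorted l (fun x => x) false).Pairwise (· < ·) := by
  have hle := PySem.List.sorted_pairwise (xs := l) (key := fun x => x)
  have hnd : (PySem.List.sorted l (fun x => x) false).Nodup :=
    (PySem.List.sorted_perm (xs := l) (key := fun x => x) (rev := false)).nodup_iff.2 h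
  have := List.Pairwise.and hle hnd
  exact this.imp (fun h => lt_of_le_of_ne h.1 h.2)

-- ===== VERDICT (by name: the statement is the Claim_ definition above) =====
theorem normalize_axes_nd_py_spec : Claim_equal_normalize_axes_nd_py := by
  intro axis ndim _hdom hpre
  unfold Spec_normalize_axes_nd_py
  match axis with
  | none => rfl
  | some l =>
    by_cases hl : l = []
    · simp [normalize_axes_nd_py, normalize_axes_nd_py_alt, hl]
    · have hr : ∀ a ∈ l, -ndim ≤ a ∧ a < ndim := by
        intro a ha; exact hpre a (by simpa using ha)
      simp only [normalize_axes_nd_py, normalize_axes_nd_py_alt, if_neg hl]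
      rw [pvALoop_eq ndim l [] hr, pvBLoop_eq ndim l [] hr]
      simp only [List.nil_append]
      -- the sorted duplicate list is nonempty
      have hsne : PySem.List.sorted (l.map (pvNormf ndim)) (fun x => x) false ≠ [] := by
        rw [Ne, PySem.List.sorted_eq_nil_iff]
        simp [hl]
      match hmatch : PySem.List.sorted (l.map (pvNormf ndim)) (fun x => x) false with
      | [] => exact absurd hmatch hsne
      | h :: t =>
        congr 1
        -- LHS: strictly increasing; members = members of map
        have hLp : (PySem.List.sorted (pvGA ndim l []) (fun x => x) false).Pairwise (· < ·) :=
          pvSorted_nodup_pairwise_lt _ (pvGA_nodup ndim l [] List.nodup_nil)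
        have hLm : ∀ x, x ∈ PySem.List.sorted (pvGA ndim l []) (fun x => x) false ↔
            x ∈ l.map (pvNormf ndim) := by
          intro x
          rw [PySem.List.mem_sorted, pvGA_mem]
          simp
        -- RHS: strictly increasing; members = members of map
        have hsp : (h :: t).Pairwise (· ≤ ·) := by
          have hp := PySem.List.sorted_pairwise (xs := l.map (pvNormf ndim)) (key := fun x => x)
          rw [hmatch] at hp
          exact hp
        have hRp : (h :: pvScan h t).Pairwise (· < ·) := pvScan_pairwise h t hsp
        have hRm : ∀ x, x ∈ h :: pvScan h t ↔ x ∈ l.map (pvNormf ndim) := by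
          intro x
          rw [pvScan_mem, ← hmatch, PySem.List.mem_sorted]
        exact pvSortedUnique _ _ hLp hRp (fun x => (hLm x).trans (hRm x).symm)
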